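-- pv_equiv track=rewrite | github.com/molnar780/Neuman-verseny | Neumann/2022/1.ford/3 fel/3,c.py | calc_line_x
-- ===== SOURCE A (Python) =====
-- def calc_line_x(current_line, x):
--     next_line=[]
--     if len(current_line)-x+1 <= 0:
--         raise IndexError
--     for i in range(x-1):
--         for j in range(len(current_line)-1):
--             next_line.append(current_line[j] + current_line[j+1])
--         current_line=next_line
--         next_line=[]
--     return current_line
-- ===== SOURCE B (Python) =====
-- def calc_line_x(current_line, x):
--     if len(current_line) - x + 1 <= 0:
--         raise IndexError
--     if x < 1:
--         return current_line
--     n = x - 1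
--     coefs = []
--     c = 1
--     for k in range(x):
--         coefs.append(c)
--         c = c * (n - k) // (k + 1)
--     return [sum(coefs[k] * current_line[j + k] for k in range(x))
--             for j in range(len(current_line) - n)]
-- ===== Notes on version B (the rewrite author's own statement) =====
-- stated objective: alternative
-- what changed: Replaces x-1 iterated adjacent-sum passes over ever-shorter lists with one binomial-coefficient convolution: a Pascal row built once by the multiplicative formula, then each output element is a single weighted sum over the original list.
import Mathlib
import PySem

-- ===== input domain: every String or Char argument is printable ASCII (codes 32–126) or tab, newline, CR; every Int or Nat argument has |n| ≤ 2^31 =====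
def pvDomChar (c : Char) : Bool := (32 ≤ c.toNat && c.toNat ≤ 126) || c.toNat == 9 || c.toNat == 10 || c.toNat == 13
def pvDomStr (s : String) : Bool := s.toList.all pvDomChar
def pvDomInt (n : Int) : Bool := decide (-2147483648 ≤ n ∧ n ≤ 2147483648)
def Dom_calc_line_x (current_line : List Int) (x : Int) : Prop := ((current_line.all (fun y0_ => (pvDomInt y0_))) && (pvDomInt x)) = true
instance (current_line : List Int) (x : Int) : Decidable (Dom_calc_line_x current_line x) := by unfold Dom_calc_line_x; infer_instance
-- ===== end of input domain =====

-- B re-implements the x-1 adjacent-sum passes as one binomial convolution (alternative algorithm);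
-- both A and B raise IndexError exactly when len(current_line) - x + 1 <= 0, which Pre_ excludes.

-- ===== PORT A =====
-- literal transliteration: the outer 'for i in range(x-1)' folds the inner pass;
-- the inner pass appends current_line[j] + current_line[j+1] for j in range(len-1)
-- (indices are always in range there, so pyGetD is exact).
def calc_line_x (current_line : List Int) (x : Int) : List Int :=
  (PySem.List.pyRange 0 (x - 1) 1).foldl
    (fun cur _ =>
      (PySem.List.pyRange 0 ((cur.length : Int) - 1) 1).foldl
        (fun nl j => nl ++ [PySem.List.pyGetD cur j 0 + PySem.List.pyGetD cur (j + 1) 0]) [])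
    current_line

-- ===== PORT B =====
-- coefficient loop of Source B: for k in range(fuel): append c; c = c*(n-k)//(k+1)
def pvCoefAux (n : Int) : Nat → Nat → Int → List Int
  | 0, _, _ => []
  | m + 1, k, c => c :: pvCoefAux n m (k + 1) (PySem.Int.floordiv (c * (n - (k : Int))) ((k : Int) + 1))

def calc_line_x_alt (current_line : List Int) (x : Int) : List Int :=
  if (current_line.length : Int) - x + 1 ≤ 0 then []  -- Source B raises IndexError here (outside Pre_)
  else if x < 1 then current_line
  else
    (List.range (current_line.length - (x - 1).toNat)).map (fun j =>
      ((List.range x.toNat).map (fun k =>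
        (pvCoefAux (x - 1) x.toNat 0 1).getD k 0 * current_line.getD (j + k) 0)).sum)

-- ===== PRECONDITION & SPEC =====
-- Pre_ excludes exactly the inputs on which A raises IndexError (len(current_line) - x + 1 <= 0).
def Pre_calc_line_x (current_line : List Int) (x : Int) : Prop :=
  x ≤ (current_line.length : Int)
instance (current_line : List Int) (x : Int) : Decidable (Pre_calc_line_x current_line x) := by
  unfold Pre_calc_line_x; infer_instance

def pvWitness_calc_line_x : List Int × Int := ([1, 2, 3, 4], 3)

def Spec_calc_line_x (current_line : List Int) (x : Int) (out : List Int) : Prop := out = calc_line_x_alt current_line x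
instance (current_line : List Int) (x : Int) (out : List Int) : Decidable (Spec_calc_line_x current_line x out) := by unfold Spec_calc_line_x; infer_instance

-- ===== CLAIM (what is proved, stated in full; the proofs are below) =====
def Claim_equal_calc_line_x : Prop := ∀ (current_line : List Int) (x : Int), Dom_calc_line_x current_line x → Pre_calc_line_x current_line x → Spec_calc_line_x current_line x (calc_line_x current_line x)

-- ===== LEMMAS AND PROOFS =====

-- proof-side abstract single pass
def pvStep (l : List Int) : List Int :=
  (List.range (l.length - 1)).map (fun j => l.getD j 0 + l.getD (j + 1) 0)

-- a foldl that ignores the element is an iterate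
theorem pv_foldl_const {α β : Type} (f : α → α) (l : List β) :
    ∀ (a : α), l.foldl (fun acc _ => f acc) a = f^[l.length] a := by
  induction l with
  | nil => intro a; rfl
  | cons b t ih =>
      intro a
      simp [List.foldl, ih, Function.iterate_succ_apply]

-- appending singletons in a foldl is a map
theorem pv_foldl_append {α β : Type} (g : β → α) (l : List β) :
    ∀ (acc : List α), l.foldl (fun nl j => nl ++ [g j]) acc = acc ++ l.map g := by
  induction l with
  | nil => intro acc; simp
  | cons b t ih => intro acc; simp [List.foldl, ih]

theorem pv_inner_eq_step (cur : List Int) :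
    (PySem.List.pyRange 0 ((cur.length : Int) - 1) 1).foldl
      (fun nl j => nl ++ [PySem.List.pyGetD cur j 0 + PySem.List.pyGetD cur (j + 1) 0]) []
    = pvStep cur := by
  rw [pv_foldl_append, PySem.List.pyRange_one]
  simp only [List.nil_append, List.map_map, pvStep]
  rw [show (((cur.length : Int) - 1 - 0).toNat) = cur.length - 1 by omega]
  apply List.map_congr_left
  intro k hk
  simp only [Function.comp_apply, zero_add]
  have h2 : ((k : Int) + 1) = ((k + 1 : Nat) : Int) := by push_cast; ring
  rw [h2, PySem.List.pyGetD_natCast, PySem.List.pyGetD_natCast]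

theorem pv_A_eq_iterate (cl : List Int) (x : Int) :
    calc_line_x cl x = pvStep^[(x - 1).toNat] cl := by
  unfold calc_line_x
  have h : ∀ cur : List Int,
      (PySem.List.pyRange 0 ((cur.length : Int) - 1) 1).foldl
        (fun nl j => nl ++ [PySem.List.pyGetD cur j 0 + PySem.List.pyGetD cur (j + 1) 0]) []
      = pvStep cur := pv_inner_eq_step
  have hfun : (fun (cur : List Int) (_ : Int) =>
      (PySem.List.pyRange 0 ((cur.length : Int) - 1) 1).foldl
        (fun nl j => nl ++ [PySem.List.pyGetD cur j 0 + PySem.List.pyGetD cur (j + 1) 0]) [])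
      = (fun (cur : List Int) (_ : Int) => pvStep cur) := by
    funext cur _; exact h cur
  rw [hfun, pv_foldl_const]
  simp [PySem.List.length_pyRange_one]

-- convolution characterisation of the iterated pass
def pvConv (l : List Int) (n : Nat) : List Int :=
  (List.range (l.length - n)).map (fun j =>
    ((List.range (n + 1)).map (fun k => (Nat.choose n k : Int) * l.getD (j + k) 0)).sum)

theorem pv_sum_range_list (m : Nat) (f : Nat → Int) :
    ((List.range m).map f).sum = ∑ k ∈ Finset.range m, f k := by
  induction m with
  | zero => simp
  | succ p ih => rw [List.range_succ, Finset.sum_range_succ]; simp [ih]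

theorem pv_pascal (n : Nat) (a : Nat → Int) (j : Nat) :
    (∑ k ∈ Finset.range (n + 2), (Nat.choose (n + 1) k : Int) * a (j + k))
    = (∑ k ∈ Finset.range (n + 1), (Nat.choose n k : Int) * a (j + k))
      + (∑ k ∈ Finset.range (n + 1), (Nat.choose n k : Int) * a (j + 1 + k)) := by
  rw [Finset.sum_range_succ' (fun k => (Nat.choose (n + 1) k : Int) * a (j + k))]
  have h1 : ∀ k, (Nat.choose (n + 1) (k + 1) : Int) = (Nat.choose n k : Int) + (Nat.choose n (k + 1) : Int) := by
    intro k; exact_mod_cast congrArg (Nat.cast : Nat → Int) (Nat.choose_succ_succ n k)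
  have hL : (∑ k ∈ Finset.range (n + 1), (Nat.choose (n + 1) (k + 1) : Int) * a (j + (k + 1)))
      = (∑ k ∈ Finset.range (n + 1), (Nat.choose n k : Int) * a (j + 1 + k))
        + (∑ k ∈ Finset.range (n + 1), (Nat.choose n (k + 1) : Int) * a (j + (k + 1))) := by
    rw [← Finset.sum_add_distrib]
    apply Finset.sum_congr rfl
    intro k _
    rw [h1 k]
    have : j + (k + 1) = j + 1 + k := by omega
    rw [this]; ring
  have hshift : (∑ k ∈ Finset.range (n + 1), (Nat.choose n (k + 1) : Int) * a (j + (k + 1)))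
      = (∑ k ∈ Finset.range (n + 2), (Nat.choose n k : Int) * a (j + k)) - (Nat.choose n 0 : Int) * a (j + 0) := by
    rw [Finset.sum_range_succ' (fun k => (Nat.choose n k : Int) * a (j + k))]
    ring
  have hdrop : (∑ k ∈ Finset.range (n + 2), (Nat.choose n k : Int) * a (j + k))
      = (∑ k ∈ Finset.range (n + 1), (Nat.choose n k : Int) * a (j + k)) := by
    rw [Finset.sum_range_succ]
    simp
  rw [hL, hshift, hdrop]
  simp [Nat.choose_zero_right]
  ring

theorem pv_iterate_eq_conv (l : List Int) (n : Nat) (hn : n ≤ l.length) :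
    pvStep^[n] l = pvConv l n := by
  induction n with
  | zero =>
      unfold pvConv
      simp only [Function.iterate_zero, id_eq, Nat.sub_zero]
      apply List.ext_getElem
      · simp
      · intro i h1 h2
        simp [List.getD_eq_getElem?_getD, (by simpa using h2 : i < l.length)]
  | succ m ih =>
      have hm : m ≤ l.length := by omega
      rw [Function.iterate_succ_apply', ih hm]
      unfold pvStep pvConv
      simp only [List.length_map, List.length_range]
      rw [show l.length - m - 1 = l.length - (m + 1) by omega]
      apply List.map_congr_left
      intro j hj
      have hj' : j < l.length - (m + 1) := List.mem_range.mp hj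
      have hget : ∀ i, i < l.length - m →
          ((List.range (l.length - m)).map (fun j =>
            ((List.range (m + 1)).map (fun k => (Nat.choose m k : Int) * l.getD (j + k) 0)).sum)).getD i 0
          = ((List.range (m + 1)).map (fun k => (Nat.choose m k : Int) * l.getD (i + k) 0)).sum := by
        intro i hi
        rw [List.getD_eq_getElem?_getD, List.getElem?_map, List.getElem?_range hi]
        rfl
      rw [hget j (by omega), hget (j + 1) (by omega)]
      rw [pv_sum_range_list, pv_sum_range_list, pv_sum_range_list]
      rw [show m + 1 + 1 = m + 2 from rfl]
      rw [pv_pascal m (fun i => l.getD i 0) j]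

-- the coefficient loop produces the Pascal row
theorem pv_coef_step (n k : Nat) :
    PySem.Int.floordiv ((Nat.choose n k : Int) * ((n : Int) - (k : Int))) ((k : Int) + 1)
    = (Nat.choose n (k + 1) : Int) := by
  by_cases hk : k < n
  · have h : (Nat.choose n k : Int) * ((n : Int) - (k : Int)) = (Nat.choose n (k + 1) : Int) * ((k : Int) + 1) := by
      have := Nat.choose_succ_right_eq n k
      have hc : ((Nat.choose n (k + 1) * (k + 1) : Nat) : Int) = ((Nat.choose n k * (n - k) : Nat) : Int) := by
        exact_mod_cast congrArg (Nat.cast : Nat → Int) this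
      push_cast [Nat.cast_sub (le_of_lt hk)] at hc
      linarith
    rw [h, PySem.Int.floordiv_eq_ediv_of_pos (by positivity)]
    exact Int.mul_ediv_cancel _ (by positivity)
  · -- k ≥ n : both sides are 0 (either n - k = 0 in Int when k = n, or choose n k = 0 when k > n)
    rcases Nat.lt_or_ge n k with h | h
    · have : Nat.choose n k = 0 := Nat.choose_eq_zero_of_lt h
      have h2 : Nat.choose n (k + 1) = 0 := Nat.choose_eq_zero_of_lt (by omega)
      simp [this, h2, PySem.Int.floordiv]
    · have hnk : n = k := by omega
      subst hnk
      simp [PySem.Int.floordiv]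

theorem pv_coefAux_eq (n : Nat) :
    ∀ (m k : Nat), pvCoefAux (n : Int) m k (Nat.choose n k : Int)
      = (List.range m).map (fun i => (Nat.choose n (k + i) : Int)) := by
  intro m
  induction m with
  | zero => intro k; rfl
  | succ p ih =>
      intro k
      rw [pvCoefAux]
      rw [pv_coef_step n k, ih (k + 1)]
      rw [List.range_succ_eq_map]
      simp [List.map_map, Function.comp]
      intro i _
      congr 1
      omega

theorem pv_coefs_eq (n : Nat) :
    pvCoefAux (n : Int) (n + 1) 0 1 = (List.range (n + 1)).map (fun i => (Nat.choose n i : Int)) := by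
  have := pv_coefAux_eq n (n + 1) 0
  simpa [Nat.choose_zero_right] using this

-- B computes pvConv under Pre_
theorem pv_B_eq_conv (cl : List Int) (x : Int) (hx : 1 ≤ x) (hpre : x ≤ (cl.length : Int)) :
    calc_line_x_alt cl x = pvConv cl (x - 1).toNat := by
  unfold calc_line_x_alt
  have hg : ¬ ((cl.length : Int) - x + 1 ≤ 0) := by omega
  rw [if_neg hg, if_neg (by omega : ¬ x < 1)]
  set n : Nat := (x - 1).toNat with hn
  have hxn : x.toNat = n + 1 := by omega
  have hxi : x - 1 = (n : Int) := by omega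
  have hcoef : pvCoefAux (x - 1) x.toNat 0 1 = (List.range (n + 1)).map (fun i => (Nat.choose n i : Int)) := by
    rw [hxi, hxn]; exact pv_coefs_eq n
  unfold pvConv
  rw [hcoef, hxn]
  apply List.map_congr_left
  intro j _
  congr 1
  apply List.map_congr_left
  intro k hk
  have hk' : k < n + 1 := List.mem_range.mp hk
  congr 1
  rw [List.getD_eq_getElem?_getD, List.getElem?_map, List.getElem?_range hk']
  rfl

-- ===== VERDICT (by name: the statement is the Claim_ definition above) =====
theorem calc_line_x_spec : Claim_equal_calc_line_x := by
  intro cl x _ hpre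
  unfold Spec_calc_line_x
  unfold Pre_calc_line_x at hpre
  by_cases hx : x < 1
  · -- loop body never runs in A; B returns current_line
    rw [pv_A_eq_iterate]
    have h0 : (x - 1).toNat = 0 := by omega
    rw [h0]
    unfold calc_line_x_alt
    rw [if_neg (by omega : ¬ ((cl.length : Int) - x + 1 ≤ 0)), if_pos hx]
    rfl
  · have hx' : 1 ≤ x := by omega
    rw [pv_A_eq_iterate, pv_B_eq_conv cl x hx' hpre]
    exact pv_iterate_eq_conv cl (x - 1).toNat (by omega)
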